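-- pv_equiv track=rewrite | github.com/Acurich/easy_ege | main.py | replace_every_second
-- ===== SOURCE A (Python) =====
-- def replace_every_second(string, old, new):
--     parts = string.split(old)
--     counter = 0
--     res = ''
--     for i in parts[:-1]:
--         if counter % 2 == 0:
--             res += i + old
--         else:
--             res += i + new
--         counter += 1
--     return res + parts[-1]
-- ===== SOURCE B (Python) =====
-- def replace_every_second(string, old, new):
--     if not old:
--         raise ValueError('empty separator')
--     out = []
--     counter = 0
--     i = 0
--     n = len(string)
--     while i < n:
--         if string.startswith(old, i):
--             out.append(old if counter % 2 == 0 else new)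
--             counter += 1
--             i += len(old)
--         else:
--             out.append(string[i])
--             i += 1
--     return ''.join(out)
-- ===== Notes on version B (the rewrite author's own statement) =====
-- stated objective: alternative
-- what changed: B drops the split-then-rejoin pass entirely: it scans the string once with startswith, emitting literal characters and, at each match, old or new by occurrence parity, joining the pieces at the end.
import Mathlib
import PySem

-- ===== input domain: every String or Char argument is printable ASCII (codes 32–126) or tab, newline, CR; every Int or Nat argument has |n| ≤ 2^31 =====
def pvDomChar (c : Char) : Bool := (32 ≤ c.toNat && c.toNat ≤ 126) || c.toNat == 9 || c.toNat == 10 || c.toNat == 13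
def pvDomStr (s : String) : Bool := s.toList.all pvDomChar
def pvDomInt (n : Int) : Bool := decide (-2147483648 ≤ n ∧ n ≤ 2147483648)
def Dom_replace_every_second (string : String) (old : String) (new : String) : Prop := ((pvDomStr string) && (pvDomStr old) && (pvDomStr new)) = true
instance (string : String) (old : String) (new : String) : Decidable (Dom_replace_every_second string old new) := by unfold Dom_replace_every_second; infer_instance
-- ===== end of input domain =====

-- B replaces A's split-then-rejoin with a single left-to-right scan that emits
-- characters and, at each occurrence of `old`, `old` or `new` by parity (alternative decomposition).


-- ===== PORT A =====
-- parts = string.split(old); res += part + (old | new) alternating over parts[:-1]; res + parts[-1]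
def replace_every_second (string : String) (old : String) (new : String) : String :=
  match PySem.Chars.split? string.toList old.toList with
  | none => ""   -- str.split('') raises ValueError; excluded by Pre_
  | some parts =>
      let st := parts.dropLast.foldl
        (fun (st : List Char × Nat) (p : List Char) =>
          (st.1 ++ p ++ (if st.2 % 2 == 0 then old.toList else new.toList), st.2 + 1))
        ([], 0)
      String.ofList (st.1 ++ parts.getLastD [])

-- ===== PORT B =====
-- the while loop of Source B: fuel = remaining length + 1 (each iteration consumes ≥ 1 char when old ≠ "")
def pvBGo (old new : List Char) : Nat → List Char → Nat → List Char
  | 0, l, _ => l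
  | _ + 1, [], _ => []
  | fuel + 1, c :: rest, counter =>
      if old.isPrefixOf (c :: rest) then
        (if counter % 2 == 0 then old else new) ++
          pvBGo old new fuel ((c :: rest).drop old.length) (counter + 1)
      else c :: pvBGo old new fuel rest counter

def replace_every_second_alt (string : String) (old : String) (new : String) : String :=
  if old.toList = [] then ""   -- Source B raises ValueError('empty separator') here; excluded by Pre_
  else String.ofList (pvBGo old.toList new.toList (string.toList.length + 1) string.toList 0)

-- ===== PRECONDITION & SPEC =====
-- Pre_ excludes only old = "": there A raises ValueError (str.split('')) and B raises ValueError too.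
def Pre_replace_every_second (string : String) (old : String) (new : String) : Prop :=
  old.toList ≠ []
instance (string : String) (old : String) (new : String) : Decidable (Pre_replace_every_second string old new) := by unfold Pre_replace_every_second; infer_instance

def pvWitness_replace_every_second : String × String × String := ("abcabcab", "b", "XY")

def Spec_replace_every_second (string : String) (old : String) (new : String) (out : String) : Prop := out = replace_every_second_alt string old new
instance (string : String) (old : String) (new : String) (out : String) : Decidable (Spec_replace_every_second string old new out) := by unfold Spec_replace_every_second; infer_instance

-- ===== CLAIM (what is proved, stated in full; the proofs are below) =====
def Claim_equal_replace_every_second : Prop := ∀ (string : String) (old : String) (new : String), Dom_replace_every_second string old new → Pre_replace_every_second string old new → Spec_replace_every_second string old new (replace_every_second string old new)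

-- ===== LEMMAS AND PROOFS =====

-- alternate-join of the split parts (the value A's foldl computes)
def pvInterleave (sep new : List Char) : Nat → List (List Char) → List Char
  | _, [] => []
  | _, [p] => p
  | k, p :: q :: ps => p ++ (if k % 2 == 0 then sep else new) ++ pvInterleave sep new (k + 1) (q :: ps)

def pvMapHead (f : List Char → List Char) : List (List Char) → List (List Char)
  | [] => []
  | p :: ps => f p :: ps

theorem pvGo_ne_nil (sep : List Char) :
    ∀ (fuel : Nat) (l cur : List Char) (acc : List (List Char)),
      PySem.Chars.splitOn.go sep fuel l cur acc ≠ [] := by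
  intro fuel
  induction fuel with
  | zero => intro l cur acc; simp [PySem.Chars.splitOn.go]
  | succ f ih =>
      intro l cur acc
      cases l with
      | nil => simp [PySem.Chars.splitOn.go]
      | cons c rest =>
          simp only [PySem.Chars.splitOn.go]
          split <;> apply ih

theorem pvGo_acc (sep : List Char) :
    ∀ (fuel : Nat) (l cur : List Char) (acc : List (List Char)),
      PySem.Chars.splitOn.go sep fuel l cur acc
        = acc.reverse ++ PySem.Chars.splitOn.go sep fuel l cur [] := by
  intro fuel
  induction fuel with
  | zero => intro l cur acc; simp [PySem.Chars.splitOn.go]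
  | succ f ih =>
      intro l cur acc
      cases l with
      | nil => simp [PySem.Chars.splitOn.go]
      | cons c rest =>
          simp only [PySem.Chars.splitOn.go]
          split
          · rw [ih _ _ (cur.reverse :: acc), ih _ _ [cur.reverse]]
            simp
          · rw [ih _ _ acc]

theorem pvMapHead_mapHead (f g : List Char → List Char) (xs : List (List Char)) :
    pvMapHead f (pvMapHead g xs) = pvMapHead (fun p => f (g p)) xs := by
  cases xs <;> simp [pvMapHead]

theorem pvGo_cur (sep : List Char) :
    ∀ (fuel : Nat) (l cur : List Char),
      PySem.Chars.splitOn.go sep fuel l cur []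
        = pvMapHead (fun p => cur.reverse ++ p) (PySem.Chars.splitOn.go sep fuel l [] []) := by
  intro fuel
  induction fuel with
  | zero => intro l cur; simp [PySem.Chars.splitOn.go, pvMapHead]
  | succ f ih =>
      intro l cur
      cases l with
      | nil => simp [PySem.Chars.splitOn.go, pvMapHead]
      | cons c rest =>
          simp only [PySem.Chars.splitOn.go]
          split
          · rw [pvGo_acc sep f _ _ [cur.reverse], pvGo_acc sep f _ _ [List.reverse []]]
            simp [pvMapHead]
          · rw [ih rest (c :: cur), ih rest [c], pvMapHead_mapHead]
            cases PySem.Chars.splitOn.go sep f rest [] [] <;> simp [pvMapHead]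

theorem pvInterleave_mapHead (sep new : List Char) (c : Char) (k : Nat)
    (ps : List (List Char)) (h : ps ≠ []) :
    pvInterleave sep new k (pvMapHead (fun p => c :: p) ps)
      = c :: pvInterleave sep new k ps := by
  match ps with
  | [] => exact absurd rfl h
  | [p] => simp [pvMapHead, pvInterleave]
  | p :: q :: t => simp [pvMapHead, pvInterleave]

theorem pvMain (sep new : List Char) (hsep : sep ≠ []) :
    ∀ (fa : Nat) (fb : Nat) (l : List Char) (k : Nat),
      l.length < fa → l.length < fb →
      pvInterleave sep new k (PySem.Chars.splitOn.go sep fa l [] [])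
        = pvBGo sep new fb l k := by
  intro fa
  induction fa with
  | zero => intro fb l k h _; omega
  | succ f ih =>
      intro fb l k hfa hfb
      match fb, hfb with
      | g + 1, hfb =>
      cases l with
      | nil => simp [PySem.Chars.splitOn.go, pvInterleave, pvBGo]
      | cons c rest =>
          simp only [PySem.Chars.splitOn.go, pvBGo]
          by_cases hp : sep.isPrefixOf (c :: rest) = true
          · simp only [hp, if_true]
            rw [pvGo_acc sep f _ _ [List.reverse []]]
            have h1 : 1 ≤ sep.length := by
              cases sep with | nil => exact absurd rfl hsep | cons _ _ => simp
            have hd : ((c :: rest).drop sep.length).length = rest.length + 1 - sep.length := by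
              simp
            have hfa' : rest.length + 1 < f + 1 := by simpa using hfa
            have hfb' : rest.length + 1 < g + 1 := by simpa using hfb
            simp only [List.reverse_nil, List.reverse_cons, List.reverse_nil, List.nil_append]
            have hne := pvGo_ne_nil sep f ((c :: rest).drop sep.length) [] []
            have hlen : ((c :: rest).drop sep.length).length < f := by omega
            have hleng : ((c :: rest).drop sep.length).length < g := by omega
            obtain ⟨q, ps, hq⟩ : ∃ q ps, PySem.Chars.splitOn.go sep f ((c :: rest).drop sep.length) [] [] = q :: ps := by
              cases hgo : PySem.Chars.splitOn.go sep f ((c :: rest).drop sep.length) [] [] with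
              | nil => exact absurd hgo hne
              | cons q ps => exact ⟨q, ps, rfl⟩
            rw [hq, List.singleton_append]
            simp only [pvInterleave, List.nil_append]
            rw [← hq, ih g _ (k + 1) hlen hleng]
          · rw [if_neg hp, if_neg hp, pvGo_cur sep f rest [c]]
            have hne := pvGo_ne_nil sep f rest [] []
            have : pvMapHead (fun p => [c].reverse ++ p) (PySem.Chars.splitOn.go sep f rest [] [])
                = pvMapHead (fun p => c :: p) (PySem.Chars.splitOn.go sep f rest [] []) := by
              cases PySem.Chars.splitOn.go sep f rest [] [] <;> simp [pvMapHead]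
            rw [this, pvInterleave_mapHead sep new c k _ hne]
            simp only [List.length_cons] at hfa hfb
            rw [ih g rest k (by omega) (by omega)]

theorem pvFold (sep new : List Char) :
    ∀ (parts : List (List Char)) (res0 : List Char) (k : Nat), parts ≠ [] →
      (parts.dropLast.foldl
        (fun (st : List Char × Nat) (p : List Char) =>
          (st.1 ++ p ++ (if st.2 % 2 == 0 then sep else new), st.2 + 1)) (res0, k)).1
        ++ parts.getLastD []
      = res0 ++ pvInterleave sep new k parts := by
  intro parts
  induction parts with
  | nil => intro _ _ h; exact absurd rfl h
  | cons p ps ih =>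
      intro res0 k _
      cases ps with
      | nil => simp [pvInterleave]
      | cons q t =>
          have h2 : (q :: t) ≠ [] := by simp
          simp only [List.dropLast_cons_of_ne_nil h2, List.foldl_cons, List.getLastD_cons]
          have := ih (res0 ++ p ++ (if k % 2 == 0 then sep else new)) (k + 1) h2
          simp only [List.getLastD_cons] at this
          rw [this]
          simp [pvInterleave]

-- ===== VERDICT (by name: the statement is the Claim_ definition above) =====
theorem replace_every_second_spec : Claim_equal_replace_every_second := by
  intro string old new _ hpre
  have hsep : old.toList ≠ [] := hpre
  unfold Spec_replace_every_second replace_every_second replace_every_second_alt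
  have hsplit : PySem.Chars.split? string.toList old.toList
      = some (PySem.Chars.splitOn string.toList old.toList) := by
    simp [PySem.Chars.split?, hsep]
  rw [if_neg hsep, hsplit]
  show String.ofList _ = _
  unfold PySem.Chars.splitOn
  rw [pvFold old.toList new.toList _ [] 0 (pvGo_ne_nil _ _ _ _ _)]
  rw [pvMain old.toList new.toList hsep _ _ _ _ (Nat.lt_succ_self _) (Nat.lt_succ_self _)]
  simp
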